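-- pv_equiv track=rewrite | github.com/arturbach-uek/Podstawy_programowania_ZIMA_2025-2026 | 04-Functions/7_15.py | max_people_at_least_3
-- ===== SOURCE A (Python) =====
-- def max_people_at_least_3(detector):
--     count = 0
--     for c in detector:
--         if c == "+":
--             count += 1
--         if c == "-":
--             count = 0
--         if count >= 3:
--             return True
--     return False
-- ===== SOURCE B (Python) =====
-- def max_people_at_least_3(detector):
--     return any(seg.count("+") >= 3 for seg in detector.split("-"))
-- ===== Notes on version B (the rewrite author's own statement) =====
-- stated objective: faster
-- what changed: Replaced the char-by-char scan with a running reset counter and early return by splitting the string on the dash separator and checking whether any segment contains at least three plus characters.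
import Mathlib
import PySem

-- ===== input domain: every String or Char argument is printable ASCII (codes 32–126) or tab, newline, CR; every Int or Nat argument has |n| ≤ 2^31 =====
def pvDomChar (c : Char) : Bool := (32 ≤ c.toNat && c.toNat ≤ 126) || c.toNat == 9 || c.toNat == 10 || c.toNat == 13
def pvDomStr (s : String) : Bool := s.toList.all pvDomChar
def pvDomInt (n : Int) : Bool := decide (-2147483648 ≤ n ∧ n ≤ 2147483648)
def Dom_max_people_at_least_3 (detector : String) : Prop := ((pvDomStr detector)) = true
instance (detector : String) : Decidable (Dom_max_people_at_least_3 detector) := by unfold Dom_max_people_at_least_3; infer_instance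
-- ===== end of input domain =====

-- B replaces A's reset-counter scan by split-on-dash and a per-segment plus count (same value; measurably faster in Python).

-- ===== PORT A =====
def pvGoA : List Char → Int → Bool
  | [], _ => false
  | c :: t, count =>
    let count1 := if c = '+' then count + 1 else count
    let count2 := if c = '-' then 0 else count1
    if 3 ≤ count2 then true else pvGoA t count2

def max_people_at_least_3 (detector : String) : Bool :=
  pvGoA detector.toList 0

-- ===== PORT B =====
-- Source B: any(seg.count("+") >= 3 for seg in detector.split("-"));
-- single-char split/count are List.splitOn / List.count on the code points.
def max_people_at_least_3_alt (detector : String) : Bool :=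
  (detector.toList.splitOn '-').any (fun seg => decide (3 ≤ seg.count '+'))

-- ===== PRECONDITION & SPEC =====
def Spec_max_people_at_least_3 (detector : String) (out : Bool) : Prop := out = max_people_at_least_3_alt detector
instance (detector : String) (out : Bool) : Decidable (Spec_max_people_at_least_3 detector out) := by unfold Spec_max_people_at_least_3; infer_instance

-- ===== CLAIM (what is proved, stated in full; the proofs are below) =====
def Claim_equal_max_people_at_least_3 : Prop := ∀ (detector : String), Dom_max_people_at_least_3 detector → Spec_max_people_at_least_3 detector (max_people_at_least_3 detector)

-- ===== LEMMAS AND PROOFS =====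

theorem pvAny_head_tail {α : Type} [Inhabited α] (f : α → Bool) (ls : List α) (h : ls ≠ []) :
    ls.any f = (f ls.headI || ls.tail.any f) := by
  cases ls with
  | nil => exact absurd rfl h
  | cons a t => simp

theorem pvSplitOn_ne_nil (l : List Char) : List.splitOn '-' l ≠ [] := by
  simp only [List.splitOn]
  exact List.splitOnP_ne_nil _ l

theorem pvGoA_eq (l : List Char) (n : Int) (h0 : 0 ≤ n) (h3 : n < 3) :
    pvGoA l n =
      (decide (3 ≤ n + ((List.splitOn '-' l).headI.count '+' : Int)) ||
        (List.splitOn '-' l).tail.any (fun seg => decide (3 ≤ seg.count '+'))) := by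
  induction l generalizing n with
  | nil =>
    simp [pvGoA, List.splitOn]
    omega
  | cons a t ih =>
    obtain ⟨s0, rest, hsr⟩ := List.exists_cons_of_ne_nil (pvSplitOn_ne_nil t)
    by_cases hm : a = '-'
    · subst hm
      have hsplit : List.splitOn '-' ('-' :: t) = [] :: List.splitOn '-' t := by
        simp [List.splitOn, List.splitOnP_cons]
      have e1 : pvGoA ('-' :: t) n = pvGoA t 0 := by simp [pvGoA]
      rw [e1, ih 0 (by omega) (by omega), hsplit, hsr]
      simp only [List.headI, List.tail_cons, List.any_cons, List.count_nil,
        Nat.cast_zero, add_zero, zero_add]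
      rw [show decide ((3:Int) ≤ n) = false from by simp; omega]
      simp only [Bool.false_or]
      congr 1
      simp only [decide_eq_decide]
      omega
    · have hsplit : List.splitOn '-' (a :: t) = (a :: s0) :: rest := by
        simp only [List.splitOn, List.splitOnP_cons] at *
        simp [hm, hsr]
      rw [hsplit]
      simp only [List.headI, List.tail_cons]
      by_cases hp : a = '+'
      · subst hp
        have e2 : pvGoA ('+' :: t) n = if 3 ≤ n + 1 then true else pvGoA t (n + 1) := by
          simp [pvGoA]
        rw [e2]
        by_cases hge : (3:Int) ≤ n + 1
        · rw [if_pos hge]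
          symm
          simp only [Bool.or_eq_true, decide_eq_true_eq]
          left
          simp only [List.count_cons_self]
          push_cast
          omega
        · rw [if_neg hge, ih (n + 1) (by omega) (by omega), hsr]
          simp only [List.headI, List.tail_cons, List.count_cons_self]
          congr 1
          simp only [decide_eq_decide]
          push_cast
          omega
      · have e3 : pvGoA (a :: t) n = pvGoA t n := by
          simp [pvGoA, hm, hp, show ¬ (3:Int) ≤ n by omega]
        rw [e3, ih n h0 h3, hsr]
        simp only [List.headI, List.tail_cons, List.count_cons_of_ne hp]
        rfl

-- ===== VERDICT (by name: the statement is the Claim_ definition above) =====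
theorem max_people_at_least_3_spec : Claim_equal_max_people_at_least_3 := by
  intro detector _
  unfold Spec_max_people_at_least_3 max_people_at_least_3 max_people_at_least_3_alt
  rw [pvGoA_eq _ 0 (by omega) (by omega),
    pvAny_head_tail _ _ (pvSplitOn_ne_nil detector.toList)]
  congr 1
  simp only [decide_eq_decide]
  omega
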